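-- pv_equiv track=rewrite | github.com/Lucasmatos2003/Uso_edu_conect | utils/helpers.py | extrair_tipo_rede_de_tags
-- ===== SOURCE A (Python) =====
-- def extrair_tipo_rede_de_tags(tags):
--     if not tags or not isinstance(tags, list):
--         return None
--
--     texto = " ".join(t.lower() for t in tags if isinstance(t, str))
--
--     if "municipal" in texto:
--         return "Municipal"
--     if "estadual" in texto:
--         return "Estadual"
--
--     return None
-- ===== SOURCE B (Python) =====
-- def extrair_tipo_rede_de_tags(tags):
--     if not tags or not isinstance(tags, list):
--         return None
--
--     found_estadual = False
--     for t in tags: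
--         if not isinstance(t, str):
--             continue
--         tl = t.lower()
--         if "municipal" in tl:
--             return "Municipal"
--         if "estadual" in tl:
--             found_estadual = True
--     return "Estadual" if found_estadual else None
-- ===== Notes on version B (the rewrite author's own statement) =====
-- stated objective: alternative
-- what changed: Replaces building one space-joined lowercase string searched twice by a single early-exit pass over the tags that tests each lowered tag directly and carries a found_estadual flag; equivalent because the keywords contain no space, so no match can span a join boundary.
import Mathlib
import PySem

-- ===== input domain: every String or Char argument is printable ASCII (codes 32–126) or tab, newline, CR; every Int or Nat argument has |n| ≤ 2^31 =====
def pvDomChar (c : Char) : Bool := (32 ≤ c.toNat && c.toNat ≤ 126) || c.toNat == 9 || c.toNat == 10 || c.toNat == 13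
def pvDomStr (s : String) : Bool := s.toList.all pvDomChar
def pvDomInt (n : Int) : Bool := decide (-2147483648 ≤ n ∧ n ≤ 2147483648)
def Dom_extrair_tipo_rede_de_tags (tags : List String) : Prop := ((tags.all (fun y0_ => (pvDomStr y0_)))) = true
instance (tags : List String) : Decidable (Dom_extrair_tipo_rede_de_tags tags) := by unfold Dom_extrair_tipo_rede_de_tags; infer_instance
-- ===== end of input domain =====

-- B replaces A's space-joined lowercase string (searched twice) by a single early-exit
-- pass over the tags carrying a found_estadual flag; equivalent since neither keyword
-- contains a space, so no match can span a join boundary. Objective: alternative.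


-- ===== PORT A =====
-- Under the type convention tags : List String, so `isinstance(tags, list)` is always true
-- and the generator's `if isinstance(t, str)` filter keeps every element.
def extrair_tipo_rede_de_tags (tags : List String) : Option String :=
  if tags = [] then none
  else
    let texto := PySem.Str.join " " (tags.map (fun t => PySem.Str.lower t))
    if PySem.Str.isIn "municipal" texto then some "Municipal"
    else if PySem.Str.isIn "estadual" texto then some "Estadual"
    else none

-- ===== PORT B =====
-- the for-loop of Source B: early return on "municipal", flag accumulator for "estadual"
def pvAltLoop (ts : List String) (found_estadual : Bool) : Option String :=
  match ts with
  | [] => if found_estadual then some "Estadual" else none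
  | t :: rest =>
    let tl := PySem.Str.lower t
    if PySem.Str.isIn "municipal" tl then some "Municipal"
    else pvAltLoop rest (found_estadual || PySem.Str.isIn "estadual" tl)

def extrair_tipo_rede_de_tags_alt (tags : List String) : Option String :=
  if tags = [] then none
  else pvAltLoop tags false

-- ===== PRECONDITION & SPEC =====
def Spec_extrair_tipo_rede_de_tags (tags : List String) (out : Option String) : Prop := out = extrair_tipo_rede_de_tags_alt tags
instance (tags : List String) (out : Option String) : Decidable (Spec_extrair_tipo_rede_de_tags tags out) := by unfold Spec_extrair_tipo_rede_de_tags; infer_instance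

-- ===== CLAIM (what is proved, stated in full; the proofs are below) =====
def Claim_equal_extrair_tipo_rede_de_tags : Prop := ∀ (tags : List String), Dom_extrair_tipo_rede_de_tags tags → Spec_extrair_tipo_rede_de_tags tags (extrair_tipo_rede_de_tags tags)

-- ===== LEMMAS AND PROOFS =====

-- a prefix of xs ++ c :: ys that avoids c stays inside xs
theorem pv_prefix_avoid {pat xs ys : List Char} {c : Char}
    (hc : c ∉ pat) (h : pat <+: xs ++ c :: ys) : pat <+: xs := by
  induction pat generalizing xs with
  | nil => exact List.nil_prefix
  | cons p ps ih =>
    cases xs with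
    | nil =>
      rcases h with ⟨t, ht⟩
      simp at ht
      exact absurd (ht.1 ▸ List.mem_cons_self) hc
    | cons x xs' =>
      rcases (List.cons_prefix_cons.mp h) with ⟨hx, hrest⟩
      exact hx ▸ List.cons_prefix_cons.mpr ⟨rfl, ih (fun hm => hc (List.mem_cons_of_mem _ hm)) hrest⟩

-- an infix avoiding the separator c lies entirely on one side of it
theorem pv_infix_split {pat : List Char} (xs ys : List Char) {c : Char}
    (hc : c ∉ pat) (hne : pat ≠ []) :
    pat <:+: xs ++ c :: ys ↔ pat <:+: xs ∨ pat <:+: ys := by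
  constructor
  · intro h
    induction xs with
    | nil =>
      simp only [List.nil_append] at h
      rcases List.infix_cons_iff.mp h with hp | hi
      · cases pat with
        | nil => exact absurd rfl hne
        | cons p ps =>
          rcases List.cons_prefix_cons.mp hp with ⟨hx, _⟩
          exact absurd (hx ▸ List.mem_cons_self) hc
      · exact Or.inr hi
    | cons x xs' ih =>
      rcases List.infix_cons_iff.mp h with hp | hi
      · exact Or.inl (pv_prefix_avoid hc hp).isInfix
      · rcases ih hi with h1 | h2
        · exact Or.inl (h1.trans ⟨[x], [], by simp⟩)
        · exact Or.inr h2
  · rintro (h | h)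
    · exact h.trans ⟨[], c :: ys, by simp⟩
    · exact h.trans ⟨xs ++ [c], [], by simp⟩

-- membership of a space-free nonempty pattern in a " "-joined list ↔ membership in one part
theorem pv_isIn_join {pat : List Char} (parts : List (List Char))
    (hc : ' ' ∉ pat) (hne : pat ≠ []) :
    PySem.Chars.isIn pat (PySem.Chars.join [' '] parts)
      = parts.any (fun p => PySem.Chars.isIn pat p) := by
  induction parts with
  | nil =>
    rw [PySem.Chars.join_nil]
    simp only [List.any_nil]
    rw [PySem.Chars.isIn_eq_false_iff]
    intro h
    exact hne (List.eq_nil_of_infix_nil h)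
  | cons p rest ih =>
    cases rest with
    | nil =>
      rw [PySem.Chars.join_singleton]
      simp
    | cons q rest' =>
      rw [PySem.Chars.join_cons_cons, List.append_assoc, List.singleton_append]
      have hsplit := pv_infix_split (pat := pat) p (PySem.Chars.join [' '] (q :: rest')) hc hne
      rw [List.any_cons, ← ih]
      refine Bool.eq_iff_iff.mpr ?_
      rw [Bool.or_eq_true, PySem.Chars.isIn_iff_infix, PySem.Chars.isIn_iff_infix,
        PySem.Chars.isIn_iff_infix]
      exact hsplit

-- closed form of B's loop
theorem pv_altLoop_eq (ts : List String) (found : Bool) :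
    pvAltLoop ts found =
      if ts.any (fun t => PySem.Str.isIn "municipal" (PySem.Str.lower t)) then some "Municipal"
      else if found || ts.any (fun t => PySem.Str.isIn "estadual" (PySem.Str.lower t)) then some "Estadual"
      else none := by
  induction ts generalizing found with
  | nil => simp [pvAltLoop]
  | cons t rest ih =>
    simp only [pvAltLoop, List.any_cons, ih]
    rcases h1 : PySem.Str.isIn "municipal" (PySem.Str.lower t) with _ | _
    · simp [Bool.or_assoc]
    · simp

-- ===== VERDICT (by name: the statement is the Claim_ definition above) =====
theorem extrair_tipo_rede_de_tags_spec : Claim_equal_extrair_tipo_rede_de_tags := by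
  intro tags _
  show extrair_tipo_rede_de_tags tags = extrair_tipo_rede_de_tags_alt tags
  unfold extrair_tipo_rede_de_tags extrair_tipo_rede_de_tags_alt
  by_cases hnil : tags = []
  · simp [hnil]
  · simp only [if_neg hnil]
    rw [pv_altLoop_eq]
    have key : ∀ (pat : String), pat.toList ≠ [] → ' ' ∉ pat.toList →
        PySem.Str.isIn pat (PySem.Str.join " " (tags.map (fun t => PySem.Str.lower t)))
          = tags.any (fun t => PySem.Str.isIn pat (PySem.Str.lower t)) := by
      intro pat hne hc
      rw [PySem.Str.isIn_eq, PySem.Str.toList_join]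
      have : (" " : String).toList = [' '] := rfl
      rw [this, pv_isIn_join _ hc hne, List.map_map, List.any_map]
      simp only [Function.comp_def, PySem.Str.isIn_eq]
    rw [key "municipal" (by decide) (by decide), key "estadual" (by decide) (by decide)]
    simp
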